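-- pv_equiv track=rewrite | github.com/peter941221/Cogito | cogito/evolution/genome.py | lstm_param_count
-- ===== SOURCE A (Python) =====
-- def lstm_param_count(
--     input_dim: int,
--     hidden_dim: int,
--     num_layers: int,
-- ) -> int:
--     """Estimate parameters for an LSTM stack."""
--
--     total = 0
--     gate_factor = 3
--     for layer in range(num_layers):
--         in_dim = input_dim if layer == 0 else hidden_dim
--         total += gate_factor * (in_dim + hidden_dim + 1) * hidden_dim
--     return total
-- ===== SOURCE B (Python) =====
-- def lstm_param_count(
--     input_dim: int,
--     hidden_dim: int,
--     num_layers: int,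
-- ) -> int:
--     """Closed-form LSTM parameter estimate: first layer + identical hidden layers."""
--     if num_layers <= 0:
--         return 0
--     first_layer = 3 * (input_dim + hidden_dim + 1) * hidden_dim
--     hidden_layer = 3 * (2 * hidden_dim + 1) * hidden_dim
--     return first_layer + (num_layers - 1) * hidden_layer
-- ===== Notes on version B (the rewrite author's own statement) =====
-- stated objective: faster
-- what changed: Replaced the per-layer summation loop with a closed form: first-layer term plus (num_layers-1) copies of the identical hidden-layer term.
import Mathlib
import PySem

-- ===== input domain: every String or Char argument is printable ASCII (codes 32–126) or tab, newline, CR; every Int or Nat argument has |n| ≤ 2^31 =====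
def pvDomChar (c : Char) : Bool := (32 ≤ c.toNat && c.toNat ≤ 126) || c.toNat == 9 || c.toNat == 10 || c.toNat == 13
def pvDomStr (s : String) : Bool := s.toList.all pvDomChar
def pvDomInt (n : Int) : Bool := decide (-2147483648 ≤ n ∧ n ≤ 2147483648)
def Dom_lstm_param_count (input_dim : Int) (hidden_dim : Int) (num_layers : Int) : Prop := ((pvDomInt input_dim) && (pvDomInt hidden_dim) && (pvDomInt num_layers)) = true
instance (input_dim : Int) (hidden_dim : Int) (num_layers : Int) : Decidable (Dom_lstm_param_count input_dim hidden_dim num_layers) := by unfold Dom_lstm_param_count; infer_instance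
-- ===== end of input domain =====

-- Closed-form re-implementation of the LSTM parameter loop: first-layer term plus
-- (num_layers-1) identical hidden-layer terms; O(1) instead of O(num_layers).


-- ===== PORT A =====
def lstm_param_count (input_dim : Int) (hidden_dim : Int) (num_layers : Int) : Int :=
  let gate_factor : Int := 3
  (PySem.List.pyRange 0 num_layers 1).foldl
    (fun total layer =>
      let in_dim := if layer == 0 then input_dim else hidden_dim
      total + gate_factor * (in_dim + hidden_dim + 1) * hidden_dim) 0

-- ===== PORT B =====
def lstm_param_count_alt (input_dim : Int) (hidden_dim : Int) (num_layers : Int) : Int :=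
  if num_layers ≤ 0 then 0
  else
    let first_layer := 3 * (input_dim + hidden_dim + 1) * hidden_dim
    let hidden_layer := 3 * (2 * hidden_dim + 1) * hidden_dim
    first_layer + (num_layers - 1) * hidden_layer

-- ===== PRECONDITION & SPEC =====
def Spec_lstm_param_count (input_dim : Int) (hidden_dim : Int) (num_layers : Int) (out : Int) : Prop := out = lstm_param_count_alt input_dim hidden_dim num_layers
instance (input_dim : Int) (hidden_dim : Int) (num_layers : Int) (out : Int) : Decidable (Spec_lstm_param_count input_dim hidden_dim num_layers out) := by unfold Spec_lstm_param_count; infer_instance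

-- ===== CLAIM =====
def Claim_equal_lstm_param_count : Prop := ∀ (input_dim : Int) (hidden_dim : Int) (num_layers : Int), Dom_lstm_param_count input_dim hidden_dim num_layers → Spec_lstm_param_count input_dim hidden_dim num_layers (lstm_param_count input_dim hidden_dim num_layers)

-- ===== LEMMAS AND PROOFS =====
-- the loop over List.range m, in closed form
theorem lstm_foldl_range (i h : Int) (m : Nat) :
    (List.range m).foldl
      (fun total (k : Nat) =>
        let layer : Int := 0 + (k : Int)
        let in_dim := if layer == 0 then i else h
        total + 3 * (in_dim + h + 1) * h) 0
    = if m = 0 then 0 else 3 * (i + h + 1) * h + ((m : Int) - 1) * (3 * (2 * h + 1) * h) := by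
  induction m with
  | zero => simp
  | succ m ih =>
    rw [List.range_succ, List.foldl_append, ih]
    rcases Nat.eq_zero_or_pos m with hm | hm
    · subst hm; simp
    · have hm0 : m ≠ 0 := Nat.pos_iff_ne_zero.mp hm
      have : ((0 : Int) + (m : Int) == 0) = false := by
        simp only [beq_eq_false_iff_ne, ne_eq]
        omega
      simp only [List.foldl_cons, List.foldl_nil, if_neg hm0, if_neg (Nat.succ_ne_zero m), this]
      push_cast
      ring

-- ===== VERDICT =====
theorem lstm_param_count_spec : Claim_equal_lstm_param_count := by
  intro i h n _
  show lstm_param_count i h n = lstm_param_count_alt i h n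
  unfold lstm_param_count lstm_param_count_alt
  rw [PySem.List.pyRange_one]
  rw [List.foldl_map]
  rw [lstm_foldl_range i h (n - 0).toNat]
  by_cases hn : n ≤ 0
  · simp [Int.toNat_of_nonpos (by omega), hn]
  · have h1 : ¬ n ≤ 0 := by omega
    have h2 : (n - 0).toNat ≠ 0 := by omega
    simp only [if_neg h1, if_neg h2]
    have : ((n - 0).toNat : Int) = n := by omega
    rw [this]
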